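-- pv_equiv track=rewrite | github.com/dzyla/seq_align | modules/antibody.py | extract_cdr_imgt
-- ===== SOURCE A (Python) =====
-- def extract_cdr_imgt(numbering):
--     """
--     Extract CDRs and Framework regions based on IMGT numbering.
--     """
--     regions = {
--         "FR1": [], "CDR1": [], "FR2": [], "CDR2": [], "FR3": [], "CDR3": [], "FR4": []
--     }
--
--     for (pos, ins), aa in numbering:
--         if aa == '-': continue
--
--         # IMGT definitions
--         if 1 <= pos <= 26:
--             regions["FR1"].append(aa)
--         elif 27 <= pos <= 38:
--             regions["CDR1"].append(aa)
--         elif 39 <= pos <= 55: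
--             regions["FR2"].append(aa)
--         elif 56 <= pos <= 65:
--             regions["CDR2"].append(aa)
--         elif 66 <= pos <= 104:
--             regions["FR3"].append(aa)
--         elif 105 <= pos <= 117:
--             regions["CDR3"].append(aa)
--         elif 118 <= pos <= 128:
--             regions["FR4"].append(aa)
--
--     return {k: "".join(v) for k, v in regions.items()}
-- ===== SOURCE B (Python) =====
-- _REGIONS = [
--     ("FR1", 1, 26), ("CDR1", 27, 38), ("FR2", 39, 55), ("CDR2", 56, 65),
--     ("FR3", 66, 104), ("CDR3", 105, 117), ("FR4", 118, 128),
-- ]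
--
--
-- def extract_cdr_imgt(numbering):
--     """
--     Extract CDRs and Framework regions based on IMGT numbering.
--     Staged passes: each region's string is built by an independent scan of
--     the numbering, keeping the residues whose position lies in that
--     region's IMGT interval (gaps '-' and out-of-range positions dropped).
--     """
--     return {
--         name: "".join(aa for (pos, _), aa in numbering
--                       if aa != '-' and lo <= pos <= hi)
--         for name, lo, hi in _REGIONS
--     }
-- ===== Notes on version B (the rewrite author's own statement) =====
-- stated objective: simpler
-- what changed: Replaces A's single pass that buckets residues into seven pre-built lists via an if-elif chain with seven independent filter-and-join passes, one per region, driven by a (name, lo, hi) interval table in a dict comprehension.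
import Mathlib
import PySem

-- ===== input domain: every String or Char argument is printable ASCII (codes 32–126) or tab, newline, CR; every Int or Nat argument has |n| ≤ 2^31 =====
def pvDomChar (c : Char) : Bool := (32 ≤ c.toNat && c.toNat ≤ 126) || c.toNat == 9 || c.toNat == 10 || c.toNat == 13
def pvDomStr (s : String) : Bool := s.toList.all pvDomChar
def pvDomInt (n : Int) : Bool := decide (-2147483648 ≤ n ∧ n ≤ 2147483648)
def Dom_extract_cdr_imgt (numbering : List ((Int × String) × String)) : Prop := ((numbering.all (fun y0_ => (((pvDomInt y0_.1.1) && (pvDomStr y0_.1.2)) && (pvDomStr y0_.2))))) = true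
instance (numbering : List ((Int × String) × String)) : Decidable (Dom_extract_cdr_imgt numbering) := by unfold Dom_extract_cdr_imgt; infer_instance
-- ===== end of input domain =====

-- B builds each region's string by its own filter-and-join pass over an interval table, instead of A's single bucketing pass (simpler decomposition, same result).

-- ===== PORT A =====
def extract_cdr_imgt (numbering : List ((Int × String) × String)) : List (String × String) :=
  let regions : PySem.Dict String (List String) :=
    ((((((PySem.Dict.empty.insert "FR1" []).insert "CDR1" []).insert "FR2" []).insert
        "CDR2" []).insert "FR3" []).insert "CDR3" []).insert "FR4" []
  let regions := numbering.foldl (fun r item =>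
    let pos := item.1.1
    let aa := item.2
    if aa = "-" then r
    else if 1 ≤ pos ∧ pos ≤ 26 then r.modify "FR1" [] (fun v => v ++ [aa])
    else if 27 ≤ pos ∧ pos ≤ 38 then r.modify "CDR1" [] (fun v => v ++ [aa])
    else if 39 ≤ pos ∧ pos ≤ 55 then r.modify "FR2" [] (fun v => v ++ [aa])
    else if 56 ≤ pos ∧ pos ≤ 65 then r.modify "CDR2" [] (fun v => v ++ [aa])
    else if 66 ≤ pos ∧ pos ≤ 104 then r.modify "FR3" [] (fun v => v ++ [aa])
    else if 105 ≤ pos ∧ pos ≤ 117 then r.modify "CDR3" [] (fun v => v ++ [aa])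
    else if 118 ≤ pos ∧ pos ≤ 128 then r.modify "FR4" [] (fun v => v ++ [aa])
    else r) regions
  regions.items.map (fun kv => (kv.1, PySem.Str.join "" kv.2))

-- ===== PORT B =====
def pvRegions : List (String × Int × Int) :=
  [("FR1", 1, 26), ("CDR1", 27, 38), ("FR2", 39, 55), ("CDR2", 56, 65),
   ("FR3", 66, 104), ("CDR3", 105, 117), ("FR4", 118, 128)]

def extract_cdr_imgt_alt (numbering : List ((Int × String) × String)) : List (String × String) :=
  pvRegions.map (fun r =>
    (r.1, PySem.Str.join "" ((numbering.filter
        (fun it => decide (it.2 ≠ "-" ∧ r.2.1 ≤ it.1.1 ∧ it.1.1 ≤ r.2.2))).map (fun it => it.2))))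

-- ===== PRECONDITION & SPEC =====
def Spec_extract_cdr_imgt (numbering : List ((Int × String) × String)) (out : List (String × String)) : Prop := out = extract_cdr_imgt_alt numbering
instance (numbering : List ((Int × String) × String)) (out : List (String × String)) : Decidable (Spec_extract_cdr_imgt numbering out) := by unfold Spec_extract_cdr_imgt; infer_instance

-- ===== CLAIM (what is proved, stated in full; the proofs are below) =====
def Claim_equal_extract_cdr_imgt : Prop := ∀ (numbering : List ((Int × String) × String)), Dom_extract_cdr_imgt numbering → Spec_extract_cdr_imgt numbering (extract_cdr_imgt numbering)

-- ===== LEMMAS AND PROOFS =====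

-- A's initial dict with seven symbolic bucket values
def pvMkD (b1 b2 b3 b4 b5 b6 b7 : List String) : PySem.Dict String (List String) :=
  ((((((PySem.Dict.empty.insert "FR1" b1).insert "CDR1" b2).insert "FR2" b3).insert
      "CDR2" b4).insert "FR3" b5).insert "CDR3" b6).insert "FR4" b7

def pvStepA (r : PySem.Dict String (List String)) (item : (Int × String) × String) :
    PySem.Dict String (List String) :=
  let pos := item.1.1
  let aa := item.2
  if aa = "-" then r
  else if 1 ≤ pos ∧ pos ≤ 26 then r.modify "FR1" [] (fun v => v ++ [aa])
  else if 27 ≤ pos ∧ pos ≤ 38 then r.modify "CDR1" [] (fun v => v ++ [aa])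
  else if 39 ≤ pos ∧ pos ≤ 55 then r.modify "FR2" [] (fun v => v ++ [aa])
  else if 56 ≤ pos ∧ pos ≤ 65 then r.modify "CDR2" [] (fun v => v ++ [aa])
  else if 66 ≤ pos ∧ pos ≤ 104 then r.modify "FR3" [] (fun v => v ++ [aa])
  else if 105 ≤ pos ∧ pos ≤ 117 then r.modify "CDR3" [] (fun v => v ++ [aa])
  else if 118 ≤ pos ∧ pos ≤ 128 then r.modify "FR4" [] (fun v => v ++ [aa])
  else r

-- the per-region selection B performs
def pvSel (lo hi : Int) (ns : List ((Int × String) × String)) : List String :=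
  (ns.filter (fun it => decide (it.2 ≠ "-" ∧ lo ≤ it.1.1 ∧ it.1.1 ≤ hi))).map (fun it => it.2)

lemma pvSel_cons_pos (lo hi pos : Int) (ins aa : String) (ns : List ((Int × String) × String))
    (h1 : ¬ aa = "-") (h2 : lo ≤ pos) (h3 : pos ≤ hi) :
    pvSel lo hi (((pos, ins), aa) :: ns) = aa :: pvSel lo hi ns := by
  simp [pvSel, h1, h2, h3]

lemma pvSel_cons_neg (lo hi pos : Int) (ins aa : String) (ns : List ((Int × String) × String))
    (h : ¬ (lo ≤ pos ∧ pos ≤ hi)) :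
    pvSel lo hi (((pos, ins), aa) :: ns) = pvSel lo hi ns := by
  have : ¬ (aa ≠ "-" ∧ lo ≤ pos ∧ pos ≤ hi) := fun hc => h hc.2
  simp [pvSel, this]

lemma pvSel_cons_gap (lo hi pos : Int) (ins : String) (ns : List ((Int × String) × String)) :
    pvSel lo hi (((pos, ins), "-") :: ns) = pvSel lo hi ns := by
  simp [pvSel]

set_option maxHeartbeats 1600000 in
lemma pvLoop_eq (ns : List ((Int × String) × String)) :
    ∀ b1 b2 b3 b4 b5 b6 b7 : List String,
      ns.foldl pvStepA (pvMkD b1 b2 b3 b4 b5 b6 b7) =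
        pvMkD (b1 ++ pvSel 1 26 ns) (b2 ++ pvSel 27 38 ns) (b3 ++ pvSel 39 55 ns) (b4 ++ pvSel 56 65 ns) (b5 ++ pvSel 66 104 ns) (b6 ++ pvSel 105 117 ns) (b7 ++ pvSel 118 128 ns) := by
  induction ns with
  | nil => intro b1 b2 b3 b4 b5 b6 b7; simp [pvSel]
  | cons x ns ih =>
    intro b1 b2 b3 b4 b5 b6 b7
    obtain ⟨⟨pos, ins⟩, aa⟩ := x
    rw [List.foldl_cons]
    by_cases hd : aa = "-"
    · subst hd
      have hstep : pvStepA (pvMkD b1 b2 b3 b4 b5 b6 b7) ((pos, ins), "-") =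
          pvMkD b1 b2 b3 b4 b5 b6 b7 := by
        simp [pvStepA]
      rw [hstep, ih]
      simp only [pvSel_cons_gap]
    by_cases h0 : pos < 1
    · have hstep : pvStepA (pvMkD b1 b2 b3 b4 b5 b6 b7) ((pos, ins), aa) = pvMkD b1 b2 b3 b4 b5 b6 b7 := by
        simp only [pvStepA]
        rw [if_neg hd, if_neg (show ¬((1:Int) ≤ pos ∧ pos ≤ 26) by omega), if_neg (show ¬((27:Int) ≤ pos ∧ pos ≤ 38) by omega), if_neg (show ¬((39:Int) ≤ pos ∧ pos ≤ 55) by omega), if_neg (show ¬((56:Int) ≤ pos ∧ pos ≤ 65) by omega), if_neg (show ¬((66:Int) ≤ pos ∧ pos ≤ 104) by omega), if_neg (show ¬((105:Int) ≤ pos ∧ pos ≤ 117) by omega), if_neg (show ¬((118:Int) ≤ pos ∧ pos ≤ 128) by omega)]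
      rw [hstep, ih]
      simp only [pvSel_cons_neg 1 26 pos ins aa ns (by omega), pvSel_cons_neg 27 38 pos ins aa ns (by omega), pvSel_cons_neg 39 55 pos ins aa ns (by omega), pvSel_cons_neg 56 65 pos ins aa ns (by omega), pvSel_cons_neg 66 104 pos ins aa ns (by omega), pvSel_cons_neg 105 117 pos ins aa ns (by omega), pvSel_cons_neg 118 128 pos ins aa ns (by omega)]
    by_cases h1 : pos < 27
    · have hstep : pvStepA (pvMkD b1 b2 b3 b4 b5 b6 b7) ((pos, ins), aa) = pvMkD (b1 ++ [aa]) b2 b3 b4 b5 b6 b7 := by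
        simp only [pvStepA]
        rw [if_neg hd, if_pos (show (1:Int) ≤ pos ∧ pos ≤ 26 by omega)]
        rfl
      rw [hstep, ih]
      simp only [pvSel_cons_pos 1 26 pos ins aa ns hd (by omega) (by omega), pvSel_cons_neg 27 38 pos ins aa ns (by omega), pvSel_cons_neg 39 55 pos ins aa ns (by omega), pvSel_cons_neg 56 65 pos ins aa ns (by omega), pvSel_cons_neg 66 104 pos ins aa ns (by omega), pvSel_cons_neg 105 117 pos ins aa ns (by omega), pvSel_cons_neg 118 128 pos ins aa ns (by omega)]
      simp [pvMkD]
    by_cases h2 : pos < 39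
    · have hstep : pvStepA (pvMkD b1 b2 b3 b4 b5 b6 b7) ((pos, ins), aa) = pvMkD b1 (b2 ++ [aa]) b3 b4 b5 b6 b7 := by
        simp only [pvStepA]
        rw [if_neg hd, if_neg (show ¬((1:Int) ≤ pos ∧ pos ≤ 26) by omega), if_pos (show (27:Int) ≤ pos ∧ pos ≤ 38 by omega)]
        rfl
      rw [hstep, ih]
      simp only [pvSel_cons_neg 1 26 pos ins aa ns (by omega), pvSel_cons_pos 27 38 pos ins aa ns hd (by omega) (by omega), pvSel_cons_neg 39 55 pos ins aa ns (by omega), pvSel_cons_neg 56 65 pos ins aa ns (by omega), pvSel_cons_neg 66 104 pos ins aa ns (by omega), pvSel_cons_neg 105 117 pos ins aa ns (by omega), pvSel_cons_neg 118 128 pos ins aa ns (by omega)]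
      simp [pvMkD]
    by_cases h3 : pos < 56
    · have hstep : pvStepA (pvMkD b1 b2 b3 b4 b5 b6 b7) ((pos, ins), aa) = pvMkD b1 b2 (b3 ++ [aa]) b4 b5 b6 b7 := by
        simp only [pvStepA]
        rw [if_neg hd, if_neg (show ¬((1:Int) ≤ pos ∧ pos ≤ 26) by omega), if_neg (show ¬((27:Int) ≤ pos ∧ pos ≤ 38) by omega), if_pos (show (39:Int) ≤ pos ∧ pos ≤ 55 by omega)]
        rfl
      rw [hstep, ih]
      simp only [pvSel_cons_neg 1 26 pos ins aa ns (by omega), pvSel_cons_neg 27 38 pos ins aa ns (by omega), pvSel_cons_pos 39 55 pos ins aa ns hd (by omega) (by omega), pvSel_cons_neg 56 65 pos ins aa ns (by omega), pvSel_cons_neg 66 104 pos ins aa ns (by omega), pvSel_cons_neg 105 117 pos ins aa ns (by omega), pvSel_cons_neg 118 128 pos ins aa ns (by omega)]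
      simp [pvMkD]
    by_cases h4 : pos < 66
    · have hstep : pvStepA (pvMkD b1 b2 b3 b4 b5 b6 b7) ((pos, ins), aa) = pvMkD b1 b2 b3 (b4 ++ [aa]) b5 b6 b7 := by
        simp only [pvStepA]
        rw [if_neg hd, if_neg (show ¬((1:Int) ≤ pos ∧ pos ≤ 26) by omega), if_neg (show ¬((27:Int) ≤ pos ∧ pos ≤ 38) by omega), if_neg (show ¬((39:Int) ≤ pos ∧ pos ≤ 55) by omega), if_pos (show (56:Int) ≤ pos ∧ pos ≤ 65 by omega)]
        rfl
      rw [hstep, ih]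
      simp only [pvSel_cons_neg 1 26 pos ins aa ns (by omega), pvSel_cons_neg 27 38 pos ins aa ns (by omega), pvSel_cons_neg 39 55 pos ins aa ns (by omega), pvSel_cons_pos 56 65 pos ins aa ns hd (by omega) (by omega), pvSel_cons_neg 66 104 pos ins aa ns (by omega), pvSel_cons_neg 105 117 pos ins aa ns (by omega), pvSel_cons_neg 118 128 pos ins aa ns (by omega)]
      simp [pvMkD]
    by_cases h5 : pos < 105
    · have hstep : pvStepA (pvMkD b1 b2 b3 b4 b5 b6 b7) ((pos, ins), aa) = pvMkD b1 b2 b3 b4 (b5 ++ [aa]) b6 b7 := by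
        simp only [pvStepA]
        rw [if_neg hd, if_neg (show ¬((1:Int) ≤ pos ∧ pos ≤ 26) by omega), if_neg (show ¬((27:Int) ≤ pos ∧ pos ≤ 38) by omega), if_neg (show ¬((39:Int) ≤ pos ∧ pos ≤ 55) by omega), if_neg (show ¬((56:Int) ≤ pos ∧ pos ≤ 65) by omega), if_pos (show (66:Int) ≤ pos ∧ pos ≤ 104 by omega)]
        rfl
      rw [hstep, ih]
      simp only [pvSel_cons_neg 1 26 pos ins aa ns (by omega), pvSel_cons_neg 27 38 pos ins aa ns (by omega), pvSel_cons_neg 39 55 pos ins aa ns (by omega), pvSel_cons_neg 56 65 pos ins aa ns (by omega), pvSel_cons_pos 66 104 pos ins aa ns hd (by omega) (by omega), pvSel_cons_neg 105 117 pos ins aa ns (by omega), pvSel_cons_neg 118 128 pos ins aa ns (by omega)]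
      simp [pvMkD]
    by_cases h6 : pos < 118
    · have hstep : pvStepA (pvMkD b1 b2 b3 b4 b5 b6 b7) ((pos, ins), aa) = pvMkD b1 b2 b3 b4 b5 (b6 ++ [aa]) b7 := by
        simp only [pvStepA]
        rw [if_neg hd, if_neg (show ¬((1:Int) ≤ pos ∧ pos ≤ 26) by omega), if_neg (show ¬((27:Int) ≤ pos ∧ pos ≤ 38) by omega), if_neg (show ¬((39:Int) ≤ pos ∧ pos ≤ 55) by omega), if_neg (show ¬((56:Int) ≤ pos ∧ pos ≤ 65) by omega), if_neg (show ¬((66:Int) ≤ pos ∧ pos ≤ 104) by omega), if_pos (show (105:Int) ≤ pos ∧ pos ≤ 117 by omega)]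
        rfl
      rw [hstep, ih]
      simp only [pvSel_cons_neg 1 26 pos ins aa ns (by omega), pvSel_cons_neg 27 38 pos ins aa ns (by omega), pvSel_cons_neg 39 55 pos ins aa ns (by omega), pvSel_cons_neg 56 65 pos ins aa ns (by omega), pvSel_cons_neg 66 104 pos ins aa ns (by omega), pvSel_cons_pos 105 117 pos ins aa ns hd (by omega) (by omega), pvSel_cons_neg 118 128 pos ins aa ns (by omega)]
      simp [pvMkD]
    by_cases h7 : pos < 129
    · have hstep : pvStepA (pvMkD b1 b2 b3 b4 b5 b6 b7) ((pos, ins), aa) = pvMkD b1 b2 b3 b4 b5 b6 (b7 ++ [aa]) := by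
        simp only [pvStepA]
        rw [if_neg hd, if_neg (show ¬((1:Int) ≤ pos ∧ pos ≤ 26) by omega), if_neg (show ¬((27:Int) ≤ pos ∧ pos ≤ 38) by omega), if_neg (show ¬((39:Int) ≤ pos ∧ pos ≤ 55) by omega), if_neg (show ¬((56:Int) ≤ pos ∧ pos ≤ 65) by omega), if_neg (show ¬((66:Int) ≤ pos ∧ pos ≤ 104) by omega), if_neg (show ¬((105:Int) ≤ pos ∧ pos ≤ 117) by omega), if_pos (show (118:Int) ≤ pos ∧ pos ≤ 128 by omega)]
        rfl
      rw [hstep, ih]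
      simp only [pvSel_cons_neg 1 26 pos ins aa ns (by omega), pvSel_cons_neg 27 38 pos ins aa ns (by omega), pvSel_cons_neg 39 55 pos ins aa ns (by omega), pvSel_cons_neg 56 65 pos ins aa ns (by omega), pvSel_cons_neg 66 104 pos ins aa ns (by omega), pvSel_cons_neg 105 117 pos ins aa ns (by omega), pvSel_cons_pos 118 128 pos ins aa ns hd (by omega) (by omega)]
      simp [pvMkD]
    · have hstep : pvStepA (pvMkD b1 b2 b3 b4 b5 b6 b7) ((pos, ins), aa) = pvMkD b1 b2 b3 b4 b5 b6 b7 := by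
        simp only [pvStepA]
        rw [if_neg hd, if_neg (show ¬((1:Int) ≤ pos ∧ pos ≤ 26) by omega), if_neg (show ¬((27:Int) ≤ pos ∧ pos ≤ 38) by omega), if_neg (show ¬((39:Int) ≤ pos ∧ pos ≤ 55) by omega), if_neg (show ¬((56:Int) ≤ pos ∧ pos ≤ 65) by omega), if_neg (show ¬((66:Int) ≤ pos ∧ pos ≤ 104) by omega), if_neg (show ¬((105:Int) ≤ pos ∧ pos ≤ 117) by omega), if_neg (show ¬((118:Int) ≤ pos ∧ pos ≤ 128) by omega)]
      rw [hstep, ih]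
      simp only [pvSel_cons_neg 1 26 pos ins aa ns (by omega), pvSel_cons_neg 27 38 pos ins aa ns (by omega), pvSel_cons_neg 39 55 pos ins aa ns (by omega), pvSel_cons_neg 56 65 pos ins aa ns (by omega), pvSel_cons_neg 66 104 pos ins aa ns (by omega), pvSel_cons_neg 105 117 pos ins aa ns (by omega), pvSel_cons_neg 118 128 pos ins aa ns (by omega)]

-- ===== VERDICT (by name: the statement is the Claim_ definition above) =====
theorem extract_cdr_imgt_spec : Claim_equal_extract_cdr_imgt := by
  intro numbering _
  unfold Spec_extract_cdr_imgt extract_cdr_imgt extract_cdr_imgt_alt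
  show ((numbering.foldl pvStepA (pvMkD [] [] [] [] [] [] [])).items.map
      (fun kv => (kv.1, PySem.Str.join "" kv.2))) = _
  rw [pvLoop_eq numbering [] [] [] [] [] [] []]
  rfl
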